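-- pv_equiv track=rewrite | github.com/dojorio/dojo-centro | 2017/20170802 - ocr bancario - python/problem.py | parse
-- ===== SOURCE A (Python) =====
-- def parse(source):
--     n = (len(source[0]) + 1) // 4
--     result = []
--     for i in range(n):
--         result.append([])
--
--     for linha in source:
--         for i in range(n):
--             result[i].append(linha[i * 4:i * 4 + 3])
--
--     return result
--
--     return         [
--           [
--               "   ",
--               "  |",
--               "  |"
--             ],
--           [
--               " _ ",
--               "| |",
--               "|_|"
--             ]
--          ]
-- ===== SOURCE B (Python) =====
-- def parse(source):
--     def go(strs, k):
--         # peel one 3-char chunk off the front of every string, drop 4 chars, recurse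
--         if k == 0:
--             return []
--         return [[s[:3] for s in strs]] + go([s[4:] for s in strs], k - 1)
--
--     return go(source, (len(source[0]) + 1) // 4)
-- ===== Notes on version B (the rewrite author's own statement) =====
-- stated objective: alternative
-- what changed: B replaces A's index arithmetic entirely: a recursion peels the leading 3-char chunk off every string and drops 4 chars from each, consuming the strings themselves n times, instead of A's pre-allocated column lists filled by nested indexed appends with i*4 slicing.
import Mathlib
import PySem

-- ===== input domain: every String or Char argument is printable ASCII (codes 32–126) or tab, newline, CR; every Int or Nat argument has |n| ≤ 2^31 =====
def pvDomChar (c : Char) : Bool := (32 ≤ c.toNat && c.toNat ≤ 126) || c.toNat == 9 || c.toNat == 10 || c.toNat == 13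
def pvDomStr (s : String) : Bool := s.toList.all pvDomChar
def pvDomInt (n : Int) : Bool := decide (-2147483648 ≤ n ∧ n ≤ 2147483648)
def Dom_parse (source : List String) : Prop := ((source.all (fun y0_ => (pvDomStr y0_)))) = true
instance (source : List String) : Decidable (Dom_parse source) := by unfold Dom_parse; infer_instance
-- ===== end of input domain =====

-- B peels the leading 3-char chunk off every string and drops 4 chars, recursing n
-- times, instead of A's indexed column appends; objective: alternative. Return value only.

-- ===== PORT A =====
-- A: n = (len(source[0])+1)//4; result = n empty lists; for each linha, append linha[i*4:i*4+3] to result[i].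
def parse (source : List String) : List (List String) :=
  let n : Int := PySem.Int.floordiv (PySem.Str.len (PySem.List.pyGetD source 0 "") + 1) 4
  let result : List (List String) :=
    (PySem.List.pyRange 0 n).foldl (fun r _ => r ++ [([] : List String)]) []
  source.foldl
    (fun result linha =>
      (PySem.List.pyRange 0 n).foldl
        (fun res i =>
          PySem.List.pySetD res i
            (PySem.List.pyGetD res i [] ++
              [PySem.Str.slice linha (some (i * 4)) (some (i * 4 + 3))]))
        result)
    result

-- ===== PORT B =====
-- go(strs, k): if k == 0 return []; else [s[:3] for s in strs] :: go([s[4:] for s in strs], k-1).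
-- The counter n = (len+1)//4 is always ≥ 0, so Python's count-down to k == 0 is recursion on n.toNat.
def pvGo : List String → Nat → List (List String)
  | _, 0 => []
  | strs, k + 1 =>
    (strs.map (fun s => PySem.Str.slice s none (some 3))) ::
      pvGo (strs.map (fun s => PySem.Str.slice s (some 4) none)) k

def parse_alt (source : List String) : List (List String) :=
  let n : Int := PySem.Int.floordiv (PySem.Str.len (PySem.List.pyGetD source 0 "") + 1) 4
  pvGo source n.toNat

-- ===== PRECONDITION & SPEC =====
-- Pre_ excludes only the empty list, on which the Python A raises IndexError at source[0].
def Pre_parse (source : List String) : Prop := source ≠ []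
instance (source : List String) : Decidable (Pre_parse source) := by unfold Pre_parse; infer_instance
def pvWitness_parse : List String := ["   ", "  |", "  |"]

def Spec_parse (source : List String) (out : List (List String)) : Prop := out = parse_alt source
instance (source : List String) (out : List (List String)) : Decidable (Spec_parse source out) := by unfold Spec_parse; infer_instance

-- ===== CLAIM (what is proved, stated in full; the proofs are below) =====
def Claim_equal_parse : Prop := ∀ (source : List String), Dom_parse source → Pre_parse source → Spec_parse source (parse source)

-- ===== LEMMAS AND PROOFS =====

-- the common canonical value: column j collects chunk j of every line
def pvChunk (linha : String) (i : Int) : String :=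
  PySem.Str.slice linha (some (i * 4)) (some (i * 4 + 3))

def pvCanon (source : List String) (N : Nat) : List (List String) :=
  (List.range N).map (fun (j : Nat) => source.map (fun l => pvChunk l ((j : Nat) : Int)))

lemma map_range_set {α : Type} (n a : Nat) (g : Nat → α) (v : α) (_ : a < n) :
    ((List.range n).map g).set a v
      = (List.range n).map (fun j => if j = a then v else g j) := by
  apply List.ext_getElem
  · simp
  · intro i h1 h2
    simp only [List.getElem_set, List.getElem_map, List.getElem_range]
    split_ifs with h3 h4 h4
    · rfl
    · omega
    · omega
    · rfl

lemma innerA (linha : String) (n k : Nat) :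
    ∀ (g : Nat → List String), k ≤ n →
      (PySem.List.pyRange ((n - k : Nat) : Int) (n : Int)).foldl
        (fun res i =>
          PySem.List.pySetD res i
            (PySem.List.pyGetD res i [] ++
              [PySem.Str.slice linha (some (i * 4)) (some (i * 4 + 3))]))
        ((List.range n).map g)
      = (List.range n).map (fun j =>
          if n - k ≤ j then
            g j ++ [PySem.Str.slice linha (some ((j : Int) * 4)) (some ((j : Int) * 4 + 3))]
          else g j) := by
  induction k with
  | zero =>
    intro g _
    rw [PySem.List.pyRange_one_eq_nil (by omega)]
    simp only [List.foldl_nil]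
    apply List.map_congr_left
    intro j hj
    rw [List.mem_range] at hj
    rw [if_neg (by omega)]
  | succ k ih =>
    intro g hk
    have han : n - (k + 1) < n := by omega
    rw [PySem.List.pyRange_one_cons (by exact_mod_cast han)]
    simp only [List.foldl_cons]
    have hget : PySem.List.pyGetD ((List.range n).map g) ((n - (k + 1) : Nat) : Int) [] = g (n - (k + 1)) := by
      rw [PySem.List.pyGetD_natCast]
      exact PySem.List.getD_map_range g n (n - (k + 1)) [] han
    rw [hget, PySem.List.pySetD_natCast,
        map_range_set n (n - (k + 1)) g _ han]
    have hcast : (((n - (k + 1) : Nat) : Int) + 1) = ((n - k : Nat) : Int) := by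
      push_cast [Nat.sub_add_eq]; omega
    rw [hcast, ih _ (by omega)]
    apply List.map_congr_left
    intro j hj
    rw [List.mem_range] at hj
    by_cases h1 : j = n - (k + 1)
    · subst h1
      simp [show ¬ (n - k ≤ n - (k + 1)) by omega]
    · by_cases h2 : n - k ≤ j
      · simp [h1, h2, show n - (k + 1) ≤ j by omega]
      · simp [h1, h2, show ¬ (n - (k + 1) ≤ j) by omega]

lemma stepA (n : Nat) (linha : String) (p : List String) :
    (PySem.List.pyRange 0 (n : Int)).foldl
      (fun res i =>
        PySem.List.pySetD res i
          (PySem.List.pyGetD res i [] ++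
            [PySem.Str.slice linha (some (i * 4)) (some (i * 4 + 3))]))
      (pvCanon p n)
    = pvCanon (p ++ [linha]) n := by
  have h := innerA linha n n (fun j => p.map (fun l => pvChunk l (j : Int))) (le_refl n)
  rw [Nat.sub_self] at h
  simp only [Nat.cast_zero] at h
  unfold pvCanon
  rw [h]
  apply List.map_congr_left
  intro j hj
  simp [pvChunk]

lemma outerA (n : Nat) :
    ∀ (src p : List String),
      src.foldl
        (fun result linha =>
          (PySem.List.pyRange 0 (n : Int)).foldl
            (fun res i =>
              PySem.List.pySetD res i
                (PySem.List.pyGetD res i [] ++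
                  [PySem.Str.slice linha (some (i * 4)) (some (i * 4 + 3))]))
            result)
        (pvCanon p n)
      = pvCanon (p ++ src) n := by
  intro src
  induction src with
  | nil => intro p; simp
  | cons linha rest ih =>
    intro p
    simp only [List.foldl_cons]
    rw [stepA n linha p, ih (p ++ [linha])]
    simp

lemma parse_eq_canon (source : List String) (_ : source ≠ []) :
    parse source
      = pvCanon source
          (PySem.Int.floordiv (PySem.Str.len (PySem.List.pyGetD source 0 "") + 1) 4).toNat := by
  have hn0 : 0 ≤ PySem.Int.floordiv (PySem.Str.len (PySem.List.pyGetD source 0 "") + 1) 4 := by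
    rw [PySem.Int.floordiv_eq_ediv_of_pos (by omega)]
    have : 0 ≤ PySem.Str.len (PySem.List.pyGetD source 0 "") := by
      simp [PySem.Str.len_eq]
    exact Int.ediv_nonneg (by omega) (by omega)
  set n : Int := PySem.Int.floordiv (PySem.Str.len (PySem.List.pyGetD source 0 "") + 1) 4 with hn
  have hcast : n = ((n.toNat : Nat) : Int) := by omega
  have hbody : parse source = source.foldl
      (fun result linha =>
        (PySem.List.pyRange 0 n).foldl
          (fun res i =>
            PySem.List.pySetD res i
              (PySem.List.pyGetD res i [] ++
                [PySem.Str.slice linha (some (i * 4)) (some (i * 4 + 3))]))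
          result)
      ((PySem.List.pyRange 0 n).foldl (fun r _ => r ++ [([] : List String)]) []) := rfl
  have hinit : (PySem.List.pyRange 0 n).foldl
      (fun r _ => r ++ [([] : List String)]) [] = pvCanon [] n.toNat := by
    rw [PySem.List.foldl_append_singleton_eq_map (fun _ => ([] : List String))]
    simp [pvCanon, PySem.List.pyRange_one, List.map_map, Function.comp_def, List.map_const']
  have houter := outerA n.toNat source []
  rw [← hcast] at houter
  rw [hbody, hinit, houter]
  simp

lemma chunk_zero (s : String) :
    PySem.Str.slice s none (some 3) = pvChunk s 0 := by
  apply String.toList_injective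
  unfold pvChunk
  rw [PySem.Str.toList_slice, PySem.Str.toList_slice]
  norm_num

lemma chunk_shift (s : String) (j : Nat) :
    pvChunk (PySem.Str.slice s (some 4) none) ((j : Nat) : Int)
      = pvChunk s (((j + 1 : Nat) : Int)) := by
  apply String.toList_injective
  unfold pvChunk
  rw [PySem.Str.toList_slice, PySem.Str.toList_slice, PySem.Str.toList_slice]
  have h1 : ((j : Int)) * 4 = ((j * 4 : Nat) : Int) := by push_cast; ring
  have h3 : (((j + 1 : Nat) : Int)) * 4 = (((j + 1) * 4 : Nat) : Int) := by push_cast; ring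
  rw [h1, h3]
  have h2 : ((j * 4 : Nat) : Int) + 3 = ((j * 4 + 3 : Nat) : Int) := by push_cast; ring
  have h4 : (((j + 1) * 4 : Nat) : Int) + 3 = (((j + 1) * 4 + 3 : Nat) : Int) := by push_cast; ring
  simp only [PySem.Chars.slice_eq_listSlice]
  rw [h2, h4, PySem.List.slice_natCast, PySem.List.slice_natCast]
  have h5 : (4 : Int) = ((4 : Nat) : Int) := by norm_num
  rw [h5, PySem.List.slice_from_natCast, List.drop_drop]
  have hd : 4 + j * 4 = (j + 1) * 4 := by ring
  have ht : j * 4 + 3 - j * 4 = (j + 1) * 4 + 3 - (j + 1) * 4 := by omega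
  rw [hd, ht]

lemma pvGo_eq (N : Nat) :
    ∀ strs : List String,
      pvGo strs N = (List.range N).map (fun j => strs.map (fun s => pvChunk s ((j : Nat) : Int))) := by
  induction N with
  | zero => intro strs; simp [pvGo]
  | succ N ih =>
    intro strs
    have hstep : pvGo strs (N + 1)
        = (strs.map (fun s => PySem.Str.slice s none (some 3))) ::
            pvGo (strs.map (fun s => PySem.Str.slice s (some 4) none)) N := rfl
    rw [hstep, ih (strs.map (fun s => PySem.Str.slice s (some 4) none)),
        List.range_succ_eq_map, List.map_cons, List.map_map]
    refine congrArg₂ List.cons ?_ ?_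
    · refine List.map_congr_left (fun s _ => ?_)
      rw [chunk_zero s]
      norm_num
    · refine List.map_congr_left (fun j _ => ?_)
      simp only [Function.comp, List.map_map]
      refine List.map_congr_left (fun s _ => ?_)
      simpa using chunk_shift s j

lemma parse_alt_eq_canon (source : List String) :
    parse_alt source
      = pvCanon source
          (PySem.Int.floordiv (PySem.Str.len (PySem.List.pyGetD source 0 "") + 1) 4).toNat := by
  unfold parse_alt pvCanon
  exact pvGo_eq _ source

-- ===== VERDICT (by name: the statement is the Claim_ definition above) =====
theorem parse_spec : Claim_equal_parse := by
  intro source _ hpre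
  unfold Spec_parse
  rw [parse_eq_canon source hpre, parse_alt_eq_canon source]
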